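-- pv_equiv track=rewrite | github.com/altermarkive/training | algorithms/code/hackerrank/word_order/test_word_order.py | orderly
-- ===== SOURCE A (Python) =====
-- import collections
--
-- def orderly(words: list[str]) -> tuple[list[str], dict[str, int]]:
--     unique = []
--     counted: collections.Counter = collections.Counter()
--     for word in words:
--         if word not in counted:
--             unique.append(word)
--         counted[word] += 1
--     return unique, counted
-- ===== SOURCE B (Python) =====
-- import collections
--
--
-- def orderly(words: list[str]) -> tuple[list[str], dict[str, int]]:
--     unique = [w for i, w in enumerate(words) if w not in words[:i]]
--     return unique, collections.Counter({w: words.count(w) for w in unique})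
-- ===== Notes on version B (the rewrite author's own statement) =====
-- stated objective: alternative
-- what changed: B drops A's running hash counter and membership branch entirely: first occurrences are found by comparing each word against its prefix words[:i] (quadratic scan), and the counts come from whole-list words.count(w) per unique word, assembled into a Counter at the end.
import Mathlib
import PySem

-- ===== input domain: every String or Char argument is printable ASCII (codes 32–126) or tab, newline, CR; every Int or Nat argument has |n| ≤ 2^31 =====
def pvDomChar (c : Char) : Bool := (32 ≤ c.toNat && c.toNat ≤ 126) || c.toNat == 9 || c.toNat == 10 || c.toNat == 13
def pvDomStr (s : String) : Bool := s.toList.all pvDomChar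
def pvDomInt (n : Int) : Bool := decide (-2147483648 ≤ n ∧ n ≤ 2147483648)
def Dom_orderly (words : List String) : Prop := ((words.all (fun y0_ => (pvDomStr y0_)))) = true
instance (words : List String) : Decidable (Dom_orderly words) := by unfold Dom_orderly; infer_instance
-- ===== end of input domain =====

-- B replaces A's single-pass running hash counter by quadratic whole-list scans: first
-- occurrences are detected by membership in the prefix words[:i], and each count is a full
-- words.count(w) scan, assembled into the Counter at the end (alternative algorithm, not faster).


-- ===== PORT A =====
-- the for-loop: state = (unique, counted); 'word not in counted' → ¬ contains;
-- 'counted[word] += 1' on a Counter → Dict.modify word 0 (· + 1)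
def orderlyLoop (words : List String) (unique : List String) (counted : PySem.Dict String Int) :
    List String × PySem.Dict String Int :=
  match words with
  | [] => (unique, counted)
  | word :: rest =>
    let unique' := if ¬ counted.contains word then unique ++ [word] else unique
    orderlyLoop rest unique' (counted.modify word 0 (· + 1))

def orderly (words : List String) : List String × (List (String × Int)) :=
  let r := orderlyLoop words [] PySem.Dict.empty
  (r.1, r.2.items)

-- ===== PORT B =====
-- '[w for i, w in enumerate(words) if w not in words[:i]]' and
-- 'Counter({w: words.count(w) for w in unique})': unique has no duplicate keys, so the
-- Counter's items are exactly these pairs in unique's order.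
def orderly_alt (words : List String) : List String × (List (String × Int)) :=
  let unique := ((PySem.List.enumerate words).filter
      (fun p => !((PySem.List.slice words none (some p.1)).contains p.2))).map Prod.snd
  (unique, unique.map (fun w => (w, (PySem.List.count words w : Int))))

-- ===== PRECONDITION & SPEC =====
def Spec_orderly (words : List String) (out : List String × (List (String × Int))) : Prop := out = orderly_alt words
instance (words : List String) (out : List String × (List (String × Int))) : Decidable (Spec_orderly words out) := by unfold Spec_orderly; infer_instance

-- ===== CLAIM (what is proved, stated in full; the proofs are below) =====
def Claim_equal_orderly : Prop := ∀ (words : List String), Dom_orderly words → Spec_orderly words (orderly words)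

-- ===== LEMMAS AND PROOFS =====

-- A-side loop invariant: while the counter's key set agrees with the unique list (as membership),
-- A's loop is Set.add's fold on the unique side and counter's fold on the counted side.
theorem orderlyLoop_inv (words : List String) :
    ∀ (u : List String) (d : PySem.Dict String Int),
      (∀ w, d.contains w = u.contains w) →
      orderlyLoop words u d =
        (words.foldl PySem.Set.add u,
         words.foldl (fun d x => d.modify x 0 (· + 1)) d) := by
  induction words with
  | nil => intro u d _; rfl
  | cons w rest ih =>
    intro u d h
    have hinv : ∀ w', (d.modify w 0 (· + 1)).contains w' =
        List.contains (PySem.Set.add u w) w' := by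
      intro w'
      rw [PySem.Dict.contains_modify]
      unfold PySem.Set.add
      split_ifs with hc
      · cases hbeq : (w' == w)
        · simpa [hbeq] using h w'
        · have hw : w' = w := by simpa using hbeq
          subst hw
          have hm : w' ∈ u := by simpa [PySem.Set.contains] using hc
          simp [hm]
      · rw [h w']
        simp only [List.contains_append]
        cases hbeq : (w' == w)
        · have hne : w' ≠ w := by simpa using hbeq
          simp [hne]
        · have hw : w' = w := by simpa using hbeq
          subst hw; simp
    unfold orderlyLoop
    simp only [List.foldl_cons]
    by_cases hc : d.contains w = true
    · have hu : u.contains w = true := by rw [← h w]; exact hc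
      have hadd : PySem.Set.add u w = u := by
        unfold PySem.Set.add; simp only [PySem.Set.contains]; rw [if_pos hu]
      rw [if_neg (by simp [hc]), ih _ _ (fun w' => by rw [hinv w', hadd]), hadd]
    · have hu : u.contains w = false := by rw [← h w]; simpa using hc
      have hadd : PySem.Set.add u w = u ++ [w] := by
        unfold PySem.Set.add; simp only [PySem.Set.contains]; rw [if_neg (by simpa using hu)]
      rw [if_pos (by simp [hc]), ih _ _ (fun w' => by rw [hinv w', hadd]), hadd]

-- B-side: the prefix-membership filter enumerates exactly the first occurrences, i.e. Set.ofList.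
theorem prefixFilter_eq_ofList (full : List String) :
    ∀ (xs pre : List String), pre ++ xs = full →
      PySem.Set.ofList full =
        PySem.Set.ofList pre ++
          ((PySem.List.enumerate xs ((pre.length : Int))).filter
            (fun p => !((PySem.List.slice full none (some p.1)).contains p.2))).map Prod.snd := by
  intro xs
  induction xs with
  | nil =>
    intro pre h
    simp only [List.append_nil] at h
    subst h
    simp [PySem.List.enumerate_nil]
  | cons x rest ih =>
    intro pre h
    have htake : PySem.List.slice full none (some ((pre.length : Int))) = pre := by
      rw [PySem.List.slice_to_natCast, ← h, List.take_left]
    have hofl : PySem.Set.ofList (pre ++ [x]) = PySem.Set.add (PySem.Set.ofList pre) x := by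
      rw [PySem.Set.ofList_eq_foldl, PySem.Set.ofList_eq_foldl, List.foldl_append]
      rfl
    have hih := ih (pre ++ [x]) (by rw [List.append_assoc]; simpa using h)
    rw [PySem.List.enumerate_cons, List.filter_cons]
    by_cases hx : x ∈ pre
    · have hcond : (!((PySem.List.slice full none (some ((pre.length : Int)))).contains x)) = false := by
        rw [htake]; simp [hx]
      rw [hcond, if_neg (by simp)]
      have hset : PySem.Set.ofList (pre ++ [x]) = PySem.Set.ofList pre := by
        rw [hofl]
        unfold PySem.Set.add
        have : PySem.Set.contains (PySem.Set.ofList pre) x = true := by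
          simp only [PySem.Set.contains, List.contains_iff_mem]
          simpa using (PySem.Set.mem_ofList pre x).mpr hx
        rw [if_pos this]
      rw [hih, hset]
      norm_num
    · have hcond : (!((PySem.List.slice full none (some ((pre.length : Int)))).contains x)) = true := by
        rw [htake]; simp [hx]
      rw [hcond, if_pos rfl]
      have hset : PySem.Set.ofList (pre ++ [x]) = PySem.Set.ofList pre ++ [x] := by
        rw [hofl]
        unfold PySem.Set.add
        rw [if_neg (by
          simp only [PySem.Set.contains, List.contains_iff_mem]
          simpa using fun hm => hx ((PySem.Set.mem_ofList pre x).mp hm))]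
      rw [hih, hset]
      simp only [List.map_cons, List.append_assoc, List.cons_append, List.nil_append]
      norm_num

-- ===== VERDICT (by name: the statement is the Claim_ definition above) =====
theorem orderly_spec : Claim_equal_orderly := by
  intro words _
  unfold Spec_orderly orderly orderly_alt
  rw [orderlyLoop_inv words [] PySem.Dict.empty (by intro w; rfl)]
  have huniq : ((PySem.List.enumerate words).filter
      (fun p => !((PySem.List.slice words none (some p.1)).contains p.2))).map Prod.snd
      = PySem.Set.ofList words := by
    have := prefixFilter_eq_ofList words words [] rfl
    simpa [PySem.List.enumerate] using this.symm
  rw [← PySem.Dict.counter_eq_foldl, ← PySem.Set.ofList_eq_foldl]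
  simp only [huniq, PySem.List.count_eq, PySem.Dict.items_counter]
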